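-- pv_equiv track=rewrite | github.com/furrypolo/secondsemester | datastructure/meet1_2 code.py | genap
-- ===== SOURCE A (Python) =====
-- def genap(a,b):
--     if a<b:
--         x=a%2
--         if x == 0:
--             n=a+1
--             return str(a) + genap(n,b)
--         else:
--             n=a+1
--             return genap(n,b)
--     elif a==b:
--         x=a%2
--         if x == 0:
--             return str(a)
--         else:
--             return (' ')
-- ===== SOURCE B (Python) =====
-- def genap(a, b):
--     if a > b:
--         return None
--     parts = [str(x) for x in range(a, b) if x % 2 == 0]
--     parts.append(str(b) if b % 2 == 0 else ' ')
--     return ''.join(parts)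
-- ===== Notes on version B (the rewrite author's own statement) =====
-- stated objective: simpler
-- what changed: Replaces A's recursion over successive integers with a single comprehension over range(a,b) filtering even numbers, plus one appended final element, joined once; Pre_ excludes a>b (A returns None, not a string) and ranges at or beyond Python's recursion limit, where A raises RecursionError (the cut-off, ~997 at top level, shifts with the caller's stack depth, so the two boundary lengths where A's fate depends on call depth are excluded too).
-- outside the precondition, e.g. on genap(5, 3): A returns None, B returns None
import Mathlib
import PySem

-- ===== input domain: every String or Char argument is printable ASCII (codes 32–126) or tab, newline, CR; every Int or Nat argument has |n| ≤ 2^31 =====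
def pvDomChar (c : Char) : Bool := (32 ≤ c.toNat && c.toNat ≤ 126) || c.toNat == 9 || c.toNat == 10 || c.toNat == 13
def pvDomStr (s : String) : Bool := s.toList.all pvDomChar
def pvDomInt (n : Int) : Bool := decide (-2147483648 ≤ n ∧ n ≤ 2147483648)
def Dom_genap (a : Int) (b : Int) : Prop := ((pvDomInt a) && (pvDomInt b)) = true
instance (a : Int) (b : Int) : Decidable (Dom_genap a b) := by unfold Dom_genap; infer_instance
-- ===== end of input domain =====

-- B replaces A's recursion with a comprehension over the range plus one join (objective: simpler).

-- ===== PORT A =====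
-- literal recursion of A; the a > b branch (Python returns None) is outside Pre_genap
def genap (a : Int) (b : Int) : String :=
  if _h : a < b then
    if PySem.Int.mod a 2 == 0 then
      PySem.Int.toStr a ++ genap (a + 1) b
    else
      genap (a + 1) b
  else if a == b then
    if PySem.Int.mod a 2 == 0 then PySem.Int.toStr a else " "
  else ""
termination_by (b - a).toNat
decreasing_by all_goals omega

-- ===== PORT B =====
def genap_alt (a : Int) (b : Int) : String :=
  if a > b then ""
  else
    let parts := ((PySem.List.pyRange a b 1).filter
        (fun x => PySem.Int.mod x 2 == 0)).map PySem.Int.toStr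
    let parts := parts ++ [if PySem.Int.mod b 2 == 0 then PySem.Int.toStr b else " "]
    String.join parts

-- ===== PRECONDITION & SPEC =====
-- Pre_ excludes a > b, where Python A returns None instead of a string, and ranges at or
-- beyond Python's recursion limit, where A raises RecursionError: A returns for b - a up to
-- 997 when called at top level, but the exact cut-off shifts with the caller's stack depth,
-- so the two boundary lengths, where A's fate depends on call depth, are excluded too.
def Pre_genap (a : Int) (b : Int) : Prop := a ≤ b ∧ b - a < 996
instance (a : Int) (b : Int) : Decidable (Pre_genap a b) := by unfold Pre_genap; infer_instance
def pvWitness_genap : Int × Int := (1, 6)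

def Spec_genap (a : Int) (b : Int) (out : String) : Prop := out = genap_alt a b
instance (a : Int) (b : Int) (out : String) : Decidable (Spec_genap a b out) := by unfold Spec_genap; infer_instance

-- ===== CLAIM =====
def Claim_equal_genap : Prop := ∀ (a : Int) (b : Int), Dom_genap a b → Pre_genap a b → Spec_genap a b (genap a b)

-- ===== LEMMAS AND PROOFS =====
theorem foldl_append_str (l : List String) (s : String) :
    List.foldl (fun r t => r ++ t) s l = s ++ List.foldl (fun r t => r ++ t) "" l := by
  induction l generalizing s with
  | nil => simp
  | cons x xs ih =>
    simp only [List.foldl]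
    rw [ih (s ++ x), ih ("" ++ x)]
    simp [String.append_assoc]

theorem genap_eq_join (a b : Int) (h : a ≤ b) :
    genap a b = String.join (((PySem.List.pyRange a b 1).filter
        (fun x => PySem.Int.mod x 2 == 0)).map PySem.Int.toStr
      ++ [if PySem.Int.mod b 2 == 0 then PySem.Int.toStr b else " "]) := by
  induction hk : (b - a).toNat generalizing a with
  | zero =>
    have hab : a = b := by omega
    subst hab
    rw [genap]
    rw [PySem.List.pyRange_one_eq_nil (le_refl a)]
    simp [String.join]
  | succ n ih =>
    have hlt : a < b := by omega
    rw [genap, dif_pos hlt, PySem.List.pyRange_one_cons hlt,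
      ih (a + 1) (by omega) (by omega)]
    simp only [List.filter_cons]
    split
    · simp only [List.map_cons, List.cons_append, String.join, List.foldl]
      rw [foldl_append_str, foldl_append_str _ ("" ++ PySem.Int.toStr a)]
      simp
    · rfl

-- ===== VERDICT =====
theorem genap_spec : Claim_equal_genap := by
  intro a b _ hpre
  unfold Pre_genap at hpre
  unfold Spec_genap genap_alt
  rw [if_neg (by omega : ¬ a > b)]
  exact genap_eq_join a b hpre.1
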